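/- GENERATED by tools/from_farm_form.py from prooffarm-gif/accepted/DGifCloseFile.3/Lemmas.lean (a worked proof of the farm's unit `DGifCloseFile.3`,
   accepted by the verdict) — do not edit. -/
import Gif.Spec.Units.DGifCloseFile_3
import Gif.Spec.AllSegs

/-!
  Lemmas for the unit `DGifCloseFile.3` (0x109cdd … 0x109d06, dgif_lib.c:700-702; an UNPROTECTED function whose heap changes): the
  segment is walked in TWO STEPS that meet at the return address 0x109cf5 (`ret9`) of `GifFreeSavedImages(gif)`. The assertion
  there is the design's own `Closing` (Gif/Spec/Seg_DGifCloseFile.lean) at the label `ret9`: behind the call the saved images are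
  freed, `CloseShape (noSaved F)` holds and what is left of the forest is owned by the heap `Hc.releaseAll …`.

      cf3_seg_call     0x109cdd … 0x109cf5: the checked load of `gif.SavedImages`; NULL: the exit 0x109d06 with the same heap;
                       otherwise the call of GifFreeSavedImages: `Ok` → `Closing` at 0x109d06 ∨ `Closing` at `ret9`
      cf3_seg_store    0x109cf5 … 0x109d06: the checked store `gif.SavedImages = NULL`: `Closing` at `ret9` → `Closing` at 0x109d06

  The general lemmas: `store_stack` (Gif/Spec/FrameCarry.lean §5), `Owns.releaseAll` along `Forest.owned_saved`
  (Gif/Spec/CommonMore.lean, ForestCarry.lean §1), `closeShape_of_shape`, `closeShape_frame` (Gif/Spec/Seg_DGifCloseFile.lean),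
  `HeapInv.writeLE_out`, `HeapInv.writeLE_live` (Asan/Heap.lean).
-/

open X86 X86.User Asan ProgX.Base ProgX.Base.Spec Gif.Spec

set_option maxRecDepth 4000
set_option maxHeartbeats 4000000

namespace Gif.Spec.DGifCloseFile_3

/-- **109CDDH … 109CF5H (ret9), or … 109D06H** (dgif_lib.c:700-701). `lea rdi, [rbx + 0x48]`, the check of the load of
`gif.SavedImages` (gif is live in `Hc`), `cmp ; je`. NULL (`F.saved = none`: an array would be a live object, not at 0): the exit
109D06H with the heap `Hc` (`noSaved F = noMaps F`). Otherwise `GifFreeSavedImages(gif)` with `Env Hc rest frames (noMaps F) R` over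
the pushed return address (`store_stack`); behind it (109CF5H) the heap is `Hc.releaseAll (the bases of Saved.objs F.saved)`. -/
theorem cf3_seg_call (Lay : Layout) (hLay : Lay.hi = 0x1000000) (μ : Microarch) (hμ : UserX.MicroOK μ) (u₀ : State)
    (hcode : HasCodeNat Lay u₀ Gif.L.DGifCloseFile.entry Gif.Code.code_DGifCloseFile.nat Gif.L.DGifCloseFile.size)
    (h_asan_load8_noabort : Asan.SmallCheck Lay μ ProgX.Base.WayInv (ProgX.Base.CodeOK u₀) [.rax, .rcx, .rdx] 8
      ProgX.Base.L.__asan_load8_noabort.entry)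
    (H : Heap) (rest : List Obj) (frames : List (Nat × FrameLayout)) (F : Forest) (R : Rd) (Hc : Heap) (e : State) (ret : Word)
    (h_GifFreeSavedImages : Calls Lay μ ProgX.Base.WayInv (ProgX.Base.conv u₀) Gif.L.GifFreeSavedImages.entry
      (Gif.Spec.GifFreeSavedImages.spec Hc rest frames (DGifCloseFile.noMaps F) R))
    (v : State) (hat : DGifCloseFile.Ok Gif.L.DGifCloseFile.at_109cdd H rest frames F R Hc (DGifCloseFile.noMaps F) u₀ e ret v) :
    ReachVia Lay μ ProgX.Base.WayInv v (fun w => ∃ H' : Heap,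
      DGifCloseFile.Closing Gif.L.DGifCloseFile.at_109d06 H rest frames F R H' (DGifCloseFile.noSaved F) u₀ e ret w ∨
      DGifCloseFile.Closing Gif.L.DGifCloseFile.ret9 H rest frames F R H' (DGifCloseFile.noSaved F) u₀ e ret w) := by
  obtain ⟨hbody, hok⟩ := hat
  have he := hbody.entry
  v_entry he
  obtain ⟨henv, hrdi, herr⟩ := hbody.pre
  have w_rip := hbody.rip
  have c_rsp : v.reg .rsp = e.reg .rsp - 40 := hbody.rsp
  have c_rbx : v.reg .rbx = e.reg .rdi := hbody.rbx
  have w_kept : RegsKept [.rsp] v v := RegsKept.refl _ _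
  have w_eq : Mem.EqOn ProgX.Base.L.textLo ProgX.Base.L.textHi u₀.mem v.mem := ProgX.Base.conv_code_eqOn hbody.code
  have hdf := (show abiInv _ from hbody.abi).1
  have hmx := (show abiInv _ from hbody.abi).2
  have hsse := ProgX.Base.sseOK_of_abiInv hbody.abi
  have k_r13 : v.mem.readLE (e.reg .rsp - 8) 8 = (e.reg .r13).toNat := hbody.slot_r13
  have k_r12 : v.mem.readLE (e.reg .rsp - 16) 8 = (e.reg .r12).toNat := hbody.slot_r12
  have k_rbp : v.mem.readLE (e.reg .rsp - 24) 8 = (e.reg .rbp).toNat := hbody.slot_rbp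
  have k_rbx : v.mem.readLE (e.reg .rsp - 32) 8 = (e.reg .rbx).toNat := hbody.slot_rbx
  have k_ra : UInt64.ofNat (v.mem.readLE (e.reg .rsp) 8) = ret := hbody.slot_ra
  have hsame : Mem.SameExcept
    [⟨(e.reg .rsp).toNat - 160, (e.reg .rsp).toNat⟩,
     ⟨0x800000, 0x1000020⟩,
     ⟨(e.reg .rsi).toNat, (e.reg .rsi).toNat + 4⟩] e.mem v.mem := hbody.same
  have hcur := henv.ctx.cursor_range henv.heap.inv.shadow
  have hgin := hok.owns.inside hbody.inv.heap (o := (F.gif, 120)) List.mem_cons_self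
  have hbase : Hc.base = 0x800000 := hbody.region.1.trans henv.heap.base
  have hlimit : Hc.limit = 0xC00000 := hbody.region.2.trans henv.heap.limit
  simp only at hgin
  rw [hbase] at hgin
  have hg1 := hgin.1
  have hg2 := hgin.2.2.2.2
  clear hgin
  -- the load of gif.SavedImages
  have hsv := hok.shape.saved
  u_walk hcode [hμ.vendor] until [Gif.L.DGifCloseFile.ret9, Gif.L.DGifCloseFile.at_109d06] span [ProgX.Base.L.textLo, ProgX.Base.L.textHi] side (v_side)
  case check_109ce1 =>
    have hun : ShadowUntouched v.mem s_109ce1.mem := by v_untouched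
    have hgl : LiveIn (Hc.liveObjs ++ rest) frames F.gif 120 :=
      hok.gif_live.liveIn rest frames (Nat.le_refl _) (Nat.le_refl _)
    exact hgl.accSmall hbody.inv.shadow hun _ 8 (by decide) (by u_omega) (by u_omega)
  case call_inv =>
    v_inv
  case pre_109cf0 =>
    obtain ⟨hinvA, hokA, hremA⟩ := store_stack hbody.inv hok ⟨hcur.1, hcur.2.1⟩ (e.reg .rsp - 48) 8 1088757
      (by u_omega) (by u_omega)
    rw [← w_mem] at hinvA hokA
    have e_rsp : (s_109cf0.reg .rsp).toNat + 8 = (e.reg .rsp).toNat - 40 := by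
      rw [w_rsp]
      u_omega
    refine ⟨⟨⟨?_, hbase, hlimit, henv.heap.text, henv.heap.offText⟩, henv.ctx, hokA⟩, ?_, ?_⟩
    · rw [e_rsp]
      exact hinvA
    · rw [w_rdi]
      exact hrdi
    · intro hnone
      rw [hnone] at hsv
      have h0 := hsv.1
      simp only [gfield] at h0
      rw [← rd_eq_readLE v.mem (e.reg .rdi + 72) (F.gif + 72) 8 (by u_omega)] at h0
      omega
  · -- 0x109d06 FROM 0x109ceb: gif.SavedImages = NULL
    have hnone : F.saved = none := by
      cases hs : F.saved with
      | none => rfl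
      | some s =>
        exfalso
        have hsv' : SavedAt (some s) (GifFileType.SavedImages v.mem F.gif) (GifFileType.ImageCount v.mem F.gif) v.mem := by
          rw [← hs]
          exact hsv
        have h0 := hsv'.1
        simp only [gfield] at h0
        rw [← rd_eq_readLE v.mem (e.reg .rdi + 72) (F.gif + 72) 8 (by u_omega)] at h0
        have hin : (s.arr, 56 * s.cap) ∈ (DGifCloseFile.noMaps F).owned := by
          apply Forest.mem_owned_saved
          show (s.arr, 56 * s.cap) ∈ Saved.objs F.saved
          rw [hs]
          exact List.mem_cons_self
        have hsin := (hok.owns.inside hbody.inv.heap hin).1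
        simp only at hsin
        have hlt := Mem.readLE_lt v.mem (e.reg .rdi + 72) 8
        omega
    have hF : DGifCloseFile.noSaved F = DGifCloseFile.noMaps F := by
      cases F
      simp only at hnone
      subst hnone
      rfl
    obtain ⟨hinvA, hokA, hremA⟩ := store_stack hbody.inv hok ⟨hcur.1, hcur.2.1⟩ (e.reg .rsp - 48) 8 1088742
      (by u_omega) (by u_omega)
    rw [← w_mem] at hinvA hokA hremA
    have hat1 : DGifCloseFile.At Gif.L.DGifCloseFile.at_109d06 H rest frames F R Hc u₀ e ret s_109ceb := {
      entry := hbody.entry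
      pre := hbody.pre
      rip := w_rip
      rsp := w_rsp
      rbx := (w_kept.get .rbx rfl).trans hbody.rbx
      rbp := (w_kept.get .rbp rfl).trans hbody.rbp
      r14 := (w_kept.get .r14 rfl).trans hbody.r14
      r15 := (w_kept.get .r15 rfl).trans hbody.r15
      slot_r13 := by
        rw [w_mem]
        u_frame k_r13
      slot_r12 := by
        rw [w_mem]
        u_frame k_r12
      slot_rbp := by
        rw [w_mem]
        u_frame k_rbp
      slot_rbx := by
        rw [w_mem]
        u_frame k_rbx
      slot_ra := by
        rw [w_mem]
        u_frame k_ra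
      inv := hinvA
      region := hbody.region
      rem := hremA.trans hbody.rem
      same := by
        rw [w_mem]
        u_same
      code := ProgX.Base.conv_code_in w_eq
      abi := by
        refine ProgX.Base.abiInv_of ?_ ?_
        · rw [w_flags]
          simp only [X86.User.df_setStatus]
          exact w_df_109ce1
        · rw [w_mxcsr]
          exact hmx
    }
    refine ReachVia.done ⟨Hc, Or.inl ?_⟩
    rw [hF]
    exact {
      at_ := hat1
      shape := DGifCloseFile.closeShape_of_shape hokA.shape hnone
      owns := hokA.owns
    }
  · -- 0x109cf5 (ret9): GifFreeSavedImages(gif) has returned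
    obtain ⟨hinv1, hshape1, hrem1⟩ := w_post
    have e_top : (s_109cf0.reg .rsp).toNat + 8 = (e.reg .rsp).toNat - 40 := by
      rw [w_rsp_109cf0]
      u_omega
    rw [e_top] at hinv1
    -- the reader at the callee's entry is the cut's: only the return address was pushed
    obtain ⟨hinvA, hokA, hremA⟩ := store_stack hbody.inv hok ⟨hcur.1, hcur.2.1⟩ (e.reg .rsp - 48) 8 1088757
      (by u_omega) (by u_omega)
    rw [← w_mem_109cf0] at hremA
    clear hinvA hokA
    v_after_call w_rsp_109cf0 w_mem_109cf0
    have hp_r13 : s_109cf0.mem.readLE (e.reg .rsp - 8) 8 = (e.reg .r13).toNat := by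
      rw [w_mem_109cf0]
      u_frame k_r13
    rw [w_mem_109cf0] at hp_r13
    have hs_r13 : s_109cf0r.mem.readLE (e.reg .rsp - 8) 8 = (e.reg .r13).toNat := by u_frame hp_r13
    have hp_r12 : s_109cf0.mem.readLE (e.reg .rsp - 16) 8 = (e.reg .r12).toNat := by
      rw [w_mem_109cf0]
      u_frame k_r12
    rw [w_mem_109cf0] at hp_r12
    have hs_r12 : s_109cf0r.mem.readLE (e.reg .rsp - 16) 8 = (e.reg .r12).toNat := by u_frame hp_r12
    have hp_rbp : s_109cf0.mem.readLE (e.reg .rsp - 24) 8 = (e.reg .rbp).toNat := by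
      rw [w_mem_109cf0]
      u_frame k_rbp
    rw [w_mem_109cf0] at hp_rbp
    have hs_rbp : s_109cf0r.mem.readLE (e.reg .rsp - 24) 8 = (e.reg .rbp).toNat := by u_frame hp_rbp
    have hp_rbx : s_109cf0.mem.readLE (e.reg .rsp - 32) 8 = (e.reg .rbx).toNat := by
      rw [w_mem_109cf0]
      u_frame k_rbx
    rw [w_mem_109cf0] at hp_rbx
    have hs_rbx : s_109cf0r.mem.readLE (e.reg .rsp - 32) 8 = (e.reg .rbx).toNat := by u_frame hp_rbx
    have hp_ra : UInt64.ofNat (s_109cf0.mem.readLE (e.reg .rsp) 8) = ret := by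
      rw [w_mem_109cf0]
      u_frame k_ra
    rw [w_mem_109cf0] at hp_ra
    have hs_ra : UInt64.ofNat (s_109cf0r.mem.readLE (e.reg .rsp) 8) = ret := by u_frame hp_ra
    have hsame1 : Mem.SameExcept
      [⟨(e.reg .rsp).toNat - 160, (e.reg .rsp).toNat⟩,
       ⟨0x800000, 0x1000020⟩,
       ⟨(e.reg .rsi).toNat, (e.reg .rsi).toNat + 4⟩] e.mem s_109cf0r.mem := by u_same
    have hat1 : DGifCloseFile.At Gif.L.DGifCloseFile.ret9 H rest frames F R
        (Hc.releaseAll ((Saved.objs (DGifCloseFile.noMaps F).saved).map Prod.fst)) u₀ e ret s_109cf0r := {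
      entry := hbody.entry
      pre := hbody.pre
      rip := w_rip
      rsp := w_rsp
      rbx := (w_kept.get .rbx rfl).trans hbody.rbx
      rbp := (w_kept.get .rbp rfl).trans hbody.rbp
      r14 := (w_kept.get .r14 rfl).trans hbody.r14
      r15 := (w_kept.get .r15 rfl).trans hbody.r15
      slot_r13 := hs_r13
      slot_r12 := hs_r12
      slot_rbp := hs_rbp
      slot_rbx := hs_rbx
      slot_ra := hs_ra
      inv := hinv1
      region := hbody.region.trans (SameRegion.releaseAll Hc _)
      rem := (hrem1.trans hremA).trans hbody.rem
      same := hsame1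
      code := w_code
      abi := w_inv
    }
    refine ReachVia.done ⟨Hc.releaseAll ((Saved.objs (DGifCloseFile.noMaps F).saved).map Prod.fst), Or.inr ?_⟩
    exact {
      at_ := hat1
      shape := ⟨hshape1.priv, hshape1.scm, hshape1.icm, hshape1.saved, hshape1.pend, hshape1.file, hshape1.state,
        hshape1.cursor⟩
      owns := (hok.owns.perm (Forest.owned_saved (DGifCloseFile.noMaps F))).releaseAll
    }

/-- **109CF5H (ret9) … 109D06H** (dgif_lib.c:702). `lea rdi, [rbx + 0x48]`, the check of the store (gif is still live: it is owned
by what is left of the forest), `mov QWORD PTR [rbx + 0x48], 0`: the heap's invariant through a stack store and a store into a live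
object; `CloseShape` through `closeShape_frame` (pv and the pending list's array are at least 64 bytes off gif: `Owns.far`). -/
theorem cf3_seg_store (Lay : Layout) (hLay : Lay.hi = 0x1000000) (μ : Microarch) (hμ : UserX.MicroOK μ) (u₀ : State)
    (hcode : HasCodeNat Lay u₀ Gif.L.DGifCloseFile.entry Gif.Code.code_DGifCloseFile.nat Gif.L.DGifCloseFile.size)
    (h_asan_store8_noabort : Asan.SmallCheck Lay μ ProgX.Base.WayInv (ProgX.Base.CodeOK u₀) [.rax, .rcx, .rdx] 8
      ProgX.Base.L.__asan_store8_noabort.entry)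
    (H : Heap) (rest : List Obj) (frames : List (Nat × FrameLayout)) (F : Forest) (R : Rd) (Hc : Heap) (e : State) (ret : Word)
    (v : State)
    (hat : DGifCloseFile.Closing Gif.L.DGifCloseFile.ret9 H rest frames F R Hc (DGifCloseFile.noSaved F) u₀ e ret v) :
    ReachVia Lay μ ProgX.Base.WayInv v
      (DGifCloseFile.Closing Gif.L.DGifCloseFile.at_109d06 H rest frames F R Hc (DGifCloseFile.noSaved F) u₀ e ret) := by
  obtain ⟨hbody, hshape, howns⟩ := hat
  have he := hbody.entry
  v_entry he
  obtain ⟨henv, hrdi, herr⟩ := hbody.pre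
  have w_rip := hbody.rip
  have c_rsp : v.reg .rsp = e.reg .rsp - 40 := hbody.rsp
  have c_rbx : v.reg .rbx = e.reg .rdi := hbody.rbx
  have w_kept : RegsKept [.rsp] v v := RegsKept.refl _ _
  have w_eq : Mem.EqOn ProgX.Base.L.textLo ProgX.Base.L.textHi u₀.mem v.mem := ProgX.Base.conv_code_eqOn hbody.code
  have hdf := (show abiInv _ from hbody.abi).1
  have hmx := (show abiInv _ from hbody.abi).2
  have hsse := ProgX.Base.sseOK_of_abiInv hbody.abi
  have k_r13 : v.mem.readLE (e.reg .rsp - 8) 8 = (e.reg .r13).toNat := hbody.slot_r13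
  have k_r12 : v.mem.readLE (e.reg .rsp - 16) 8 = (e.reg .r12).toNat := hbody.slot_r12
  have k_rbp : v.mem.readLE (e.reg .rsp - 24) 8 = (e.reg .rbp).toNat := hbody.slot_rbp
  have k_rbx : v.mem.readLE (e.reg .rsp - 32) 8 = (e.reg .rbx).toNat := hbody.slot_rbx
  have k_ra : UInt64.ofNat (v.mem.readLE (e.reg .rsp) 8) = ret := hbody.slot_ra
  have hsame : Mem.SameExcept
    [⟨(e.reg .rsp).toNat - 160, (e.reg .rsp).toNat⟩,
     ⟨0x800000, 0x1000020⟩,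
     ⟨(e.reg .rsi).toNat, (e.reg .rsi).toNat + 4⟩] e.mem v.mem := hbody.same
  have hcur := henv.ctx.cursor_range henv.heap.inv.shadow
  have hglive : Hc.Live F.gif 120 := howns.live (F.gif, 120) List.mem_cons_self
  have hgin := howns.inside hbody.inv.heap (o := (F.gif, 120)) List.mem_cons_self
  have hbase : Hc.base = 0x800000 := hbody.region.1.trans henv.heap.base
  have hlimit : Hc.limit = 0xC00000 := hbody.region.2.trans henv.heap.limit
  simp only at hgin
  rw [hbase] at hgin
  have hg1 := hgin.1
  have hg2 := hgin.2.2.2.2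
  clear hgin
  u_walk hcode [hμ.vendor] until [Gif.L.DGifCloseFile.at_109d06] span [ProgX.Base.L.textLo, ProgX.Base.L.textHi] side (v_side)
  case check_109cf9 =>
    have hun : ShadowUntouched v.mem s_109cf9.mem := by v_untouched
    have hgl : LiveIn (Hc.liveObjs ++ rest) frames F.gif 120 :=
      hglive.liveIn rest frames (Nat.le_refl _) (Nat.le_refl _)
    exact hgl.accSmall hbody.inv.shadow hun _ 8 (by decide) (by u_omega) (by u_omega)
  -- 0x109d06: `gif.SavedImages = NULL` is stored (0 over 0)
  -- where pv and the pending list's array are: live objects of `Hc`, at least 64 bytes off gif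
  have hpvin : (F.pv, 24936) ∈ (DGifCloseFile.noSaved F).owned := List.mem_cons_of_mem _ List.mem_cons_self
  have hgne := (List.pairwise_cons.mp howns.apart).1
  have hpv_in := howns.inside hbody.inv.heap hpvin
  simp only at hpv_in
  rw [hbase] at hpv_in
  have hpv1 := hpv_in.1
  have hpv2 := hpv_in.2.2.2.2
  clear hpv_in
  have hpv_far : F.gif + 120 + 64 ≤ F.pv ∨ F.pv + 24936 + 64 ≤ F.gif := by
    have hne : ((F.gif, 120) : Nat × Nat) ≠ (F.pv, 24936) := fun h => hgne (F.pv, 24936) List.mem_cons_self (congrArg Prod.fst h)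
    exact howns.far hbody.inv.heap List.mem_cons_self hpvin hne
  have hpend_far : ∀ x, F.pend = some x → 0x800040 ≤ x.arr ∧ x.arr + 24 * x.blocks.length + 32 ≤ 0xC00000 ∧
      (F.gif + 120 + 64 ≤ x.arr ∨ x.arr + 24 * x.blocks.length + 64 ≤ F.gif) := by
    intro x hx
    have hin0 : (x.arr, 24 * x.cap) ∈ Exts.objs (DGifCloseFile.noSaved F).pend := by
      show (x.arr, 24 * x.cap) ∈ Exts.objs F.pend
      rw [hx]
      exact List.mem_cons_self
    have hin : (x.arr, 24 * x.cap) ∈ (DGifCloseFile.noSaved F).owned := Forest.mem_owned_pend hin0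
    have hne : ((F.gif, 120) : Nat × Nat) ≠ (x.arr, 24 * x.cap) :=
      fun h => hgne (x.arr, 24 * x.cap) (List.mem_cons_of_mem _ (List.mem_append_right _ hin0)) (congrArg Prod.fst h)
    have hfar := howns.far hbody.inv.heap List.mem_cons_self hin hne
    have hxin := howns.inside hbody.inv.heap hin
    have hpd : ExtsAt (some x) (GifFileType.ExtensionBlocks v.mem F.gif) (GifFileType.ExtensionBlockCount v.mem F.gif) v.mem := by
      rw [← hx]
      exact hshape.pend
    have hlen := hpd.2.2.1
    simp only at hfar hxin
    rw [hbase] at hxin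
    have hx1 := hxin.1
    have hx2 := hxin.2.2.2.2
    omega
  have hs : Mem.SameExcept [⟨(e.reg .rsp).toNat - 48, (e.reg .rsp).toNat - 40⟩, ⟨F.gif + 72, F.gif + 80⟩] v.mem s_109cfe.mem := by
    rw [w_mem]
    u_same
  have hinvA := hbody.inv.writeLE_out (e.reg .rsp - 48) 8 1088766 (by u_omega) (by rw [hbase]; left; u_omega)
    (by left; u_omega)
  have hinvB := hinvA.writeLE_live hglive (e.reg .rdi + 72) 8 0 (by u_omega) (by u_omega)
  rw [← w_mem] at hinvB
  have hremB : rem R s_109cfe.mem = rem R v.mem := by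
    apply rem_sameExcept hs (by omega)
    intro w hw
    simp only [List.mem_cons, List.not_mem_nil, or_false] at hw
    rcases hw with rfl | rfl
    · simp only
      omega
    · simp only
      omega
  -- the stored field reads 0
  have hsaved : GifFileType.SavedImages s_109cfe.mem (DGifCloseFile.noSaved F).gif = 0 := by
    simp only [gfield]
    rw [w_mem, rd_writeLE_same _ (e.reg .rdi + 72) 8 0 (F.gif + 72) (by u_omega) (by decide)]
  -- everything else `CloseShape` reads is untouched
  have heq : ∀ a b : Nat, (b ≤ (e.reg .rsp).toNat - 48 ∨ (e.reg .rsp).toNat - 40 ≤ a) → (b ≤ F.gif + 72 ∨ F.gif + 80 ≤ a) →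
      Mem.EqOn a b v.mem s_109cfe.mem := by
    intro a b h1 h2
    apply hs.eqOn
    intro w hw
    simp only [List.mem_cons, List.not_mem_nil, or_false] at hw
    rcases hw with rfl | rfl
    · exact h1
    · exact h2
  have hk : DGifCloseFile.CloseKept (DGifCloseFile.noSaved F) R v.mem s_109cfe.mem := {
    scmField := heq (F.gif + 24) (F.gif + 32) (by right; omega) (by left; omega)
    icmField := heq (F.gif + 64) (F.gif + 72) (by right; omega) (by left; omega)
    pendFields := heq (F.gif + 80) (F.gif + 96) (by right; omega) (by right; omega)
    privField := heq (F.gif + 112) (F.gif + 120) (by right; omega) (by right; omega)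
    state := heq F.pv (F.pv + 4) (by right; omega) (by omega)
    file := heq (F.pv + 64) (F.pv + 72) (by right; omega) (by omega)
    cursor := heq R.cur (R.cur + 16) (by right; omega) (by left; omega)
    scm := fun o ho => absurd ho List.not_mem_nil
    icm := fun o ho => absurd ho List.not_mem_nil
    pend := by
      intro o ho
      cases hx : F.pend with
      | none =>
        have ho' : o ∈ Exts.structs F.pend := ho
        rw [hx] at ho'
        exact absurd ho' List.not_mem_nil
      | some x =>
        have ho' : o ∈ Exts.structs F.pend := ho
        rw [hx] at ho'
        have e := List.mem_singleton.mp ho'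
        obtain ⟨k1, k2, k3⟩ := hpend_far x hx
        rw [e]
        exact heq _ _ (by right; simp only; omega) (by simp only; omega)
  }
  have hshape1 : CloseShape (DGifCloseFile.noSaved F) R s_109cfe.mem := by
    refine DGifCloseFile.closeShape_frame hshape hk hsaved ?_ ?_ ?_ ?_ ?_ ?_
    · show F.gif + 120 < 2 ^ 64
      omega
    · show F.pv + 72 < 2 ^ 64
      omega
    · omega
    · intro x hx
      cases hx
    · intro x hx
      cases hx
    · intro x hx
      obtain ⟨k1, k2, k3⟩ := hpend_far x hx
      omega
  have hat1 : DGifCloseFile.At Gif.L.DGifCloseFile.at_109d06 H rest frames F R Hc u₀ e ret s_109cfe := {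
    entry := hbody.entry
    pre := hbody.pre
    rip := w_rip
    rsp := w_rsp
    rbx := (w_kept.get .rbx rfl).trans hbody.rbx
    rbp := (w_kept.get .rbp rfl).trans hbody.rbp
    r14 := (w_kept.get .r14 rfl).trans hbody.r14
    r15 := (w_kept.get .r15 rfl).trans hbody.r15
    slot_r13 := by
      rw [w_mem]
      u_frame k_r13
    slot_r12 := by
      rw [w_mem]
      u_frame k_r12
    slot_rbp := by
      rw [w_mem]
      u_frame k_rbp
    slot_rbx := by
      rw [w_mem]
      u_frame k_rbx
    slot_ra := by
      rw [w_mem]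
      u_frame k_ra
    inv := hinvB
    region := hbody.region
    rem := hremB.trans hbody.rem
    same := by
      rw [w_mem]
      u_same
    code := ProgX.Base.conv_code_in w_eq
    abi := by
      refine ProgX.Base.abiInv_of ?_ ?_
      · rw [w_flags]
        exact w_df_109cf9
      · rw [w_mxcsr]
        exact hmx
  }
  refine ReachVia.done ?_
  exact {
    at_ := hat1
    shape := hshape1
    owns := howns
  }

end Gif.Spec.DGifCloseFile_3
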